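-- pv_equiv track=rewrite | github.com/DoctorLai/ACM | binarysearch/Number-of-Unique-Binary-Search-Trees/Number-of-Unique-Binary-Search-Trees.py | solve
-- ===== SOURCE A (Python) =====
-- def solve(n):
--     MOD = 10 ** 9 + 7
--     dp = [0] * (n + 1)
--     dp[0] = 1
--
--     for i in range(1, n + 1):
--         for k in range(i):
--             dp[i] += dp[k] * dp[i - 1 - k]
--
--     return dp[n] % MOD
-- ===== SOURCE B (Python) =====
-- def solve(n):
--     # O(n) multiplicative Catalan recurrence C_{i+1} = C_i * (4i+2) // (i+2) (exact division)
--     MOD = 10 ** 9 + 7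
--     c = 1
--     for i in range(n):
--         c = c * (4 * i + 2) // (i + 2)
--     return c % MOD
-- ===== Notes on version B (the rewrite author's own statement) =====
-- stated objective: faster
-- what changed: Replaces the quadratic convolution DP over all smaller Catalan numbers with the linear multiplicative Catalan recurrence (each Catalan number from the previous by one multiplication and one exact integer division), then a single final mod.
import Mathlib
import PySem

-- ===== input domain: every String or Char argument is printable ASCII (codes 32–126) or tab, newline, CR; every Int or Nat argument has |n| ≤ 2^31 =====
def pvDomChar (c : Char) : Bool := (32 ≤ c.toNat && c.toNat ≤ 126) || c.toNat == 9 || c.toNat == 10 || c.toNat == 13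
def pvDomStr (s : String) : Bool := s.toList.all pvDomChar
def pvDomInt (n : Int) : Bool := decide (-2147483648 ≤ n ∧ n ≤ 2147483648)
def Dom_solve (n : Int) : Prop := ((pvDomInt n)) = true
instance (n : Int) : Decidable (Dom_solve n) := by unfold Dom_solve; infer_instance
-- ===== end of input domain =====

-- B replaces A's quadratic Catalan convolution DP with the linear multiplicative
-- Catalan recurrence (each step one multiplication and one exact division); objective: faster.

-- ===== PORT A =====
-- Under Pre_solve every index A uses lies inside the dp table, so List.set / List.getD
-- at `.toNat` indices are exact for Python's dp accesses.
def solve (n : Int) : Int :=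
  let M : Int := 10 ^ 9 + 7
  let dp0 : List Int := (List.replicate (n + 1).toNat 0).set 0 1
  let dp := (PySem.List.pyRange 1 (n + 1) 1).foldl (fun d i =>
      (PySem.List.pyRange 0 i 1).foldl (fun d k =>
        d.set i.toNat (d.getD i.toNat 0 + d.getD k.toNat 0 * d.getD (i - 1 - k).toNat 0)) d) dp0
  PySem.Int.mod (dp.getD n.toNat 0) M

-- ===== PORT B =====
def solve_alt (n : Int) : Int :=
  PySem.Int.mod
    ((PySem.List.pyRange 0 n 1).foldl (fun c i => PySem.Int.floordiv (c * (4 * i + 2)) (i + 2)) 1)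
    (10 ^ 9 + 7)

-- ===== PRECONDITION & SPEC =====
-- A raises IndexError for negative n (its dp table is created empty, and seeding it fails)
def Pre_solve (n : Int) : Prop := 0 ≤ n
instance (n : Int) : Decidable (Pre_solve n) := by unfold Pre_solve; infer_instance
def pvWitness_solve : Int := 3

def Spec_solve (n : Int) (out : Int) : Prop := out = solve_alt n
instance (n : Int) (out : Int) : Decidable (Spec_solve n out) := by unfold Spec_solve; infer_instance

-- ===== CLAIM (what is proved, stated in full; the proofs are below) =====
def Claim_equal_solve : Prop := ∀ (n : Int), Dom_solve n → Pre_solve n → Spec_solve n (solve n)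

-- ===== LEMMAS AND PROOFS =====

-- A's outer-loop body, and the invariant it maintains (dp[j] = catalan j once filled)
def dpStep (d : List Int) (i : Int) : List Int :=
  (PySem.List.pyRange 0 i 1).foldl (fun d k =>
    d.set i.toNat (d.getD i.toNat 0 + d.getD k.toNat 0 * d.getD (i - 1 - k).toNat 0)) d

def dpInv (n m : Nat) (dp : List Int) : Prop :=
  dp.length = n + 1 ∧ ∀ j : Nat, j < n + 1 →
    dp.getD j 0 = if j ≤ m then (catalan j : Int) else 0

-- the multiplicative step fact shared by both sides
lemma cat_step (i : Nat) : (i + 2) * catalan (i + 1) = (4 * i + 2) * catalan i := by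
  have h1 := succ_mul_catalan_eq_centralBinom (i + 1)
  have h2 := Nat.succ_mul_centralBinom_succ i
  have h3 := succ_mul_catalan_eq_centralBinom i
  apply Nat.eq_of_mul_eq_mul_left (show 0 < i + 1 by omega)
  calc (i + 1) * ((i + 2) * catalan (i + 1))
      = (i + 1) * ((i + 1 + 1) * catalan (i + 1)) := by ring
    _ = (i + 1) * (i + 1).centralBinom := by rw [h1]
    _ = 2 * (2 * i + 1) * i.centralBinom := h2
    _ = 2 * (2 * i + 1) * ((i + 1) * catalan i) := by rw [h3]
    _ = (i + 1) * ((4 * i + 2) * catalan i) := by ring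

-- B's loop computes the Catalan numbers
lemma alt_loop (m : Nat) :
    (PySem.List.pyRange 0 (m : Int) 1).foldl
      (fun c i => PySem.Int.floordiv (c * (4 * i + 2)) (i + 2)) 1 = (catalan m : Int) := by
  induction m with
  | zero => simp [PySem.List.pyRange_one_eq_nil]
  | succ m ih =>
    have : ((m + 1 : Nat) : Int) = (m : Int) + 1 := by push_cast; ring
    rw [this, PySem.List.pyRange_one_succ_right (by positivity), List.foldl_append, ih]
    simp only [List.foldl]
    have hdvd : ((catalan m : Int) * (4 * (m : Int) + 2)) = ((m : Int) + 2) * (catalan (m + 1) : Int) := by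
      have hc : ((m : Int) + 2) * (catalan (m + 1) : Int) = (4 * (m : Int) + 2) * (catalan m : Int) := by
        exact_mod_cast cat_step m
      rw [hc]; ring
    rw [PySem.Int.floordiv_eq_ediv_of_pos (by positivity), hdvd,
      Int.mul_ediv_cancel_left _ (by positivity)]

lemma getD_set_ne' (l : List Int) (j t : Nat) (v : Int) (h : t ≠ j) :
    (l.set j v).getD t 0 = l.getD t 0 := by
  simp [List.getD, (Ne.symm h : ¬ j = t)]

lemma getD_set_self' (l : List Int) (j : Nat) (v : Int) (h : j < l.length) :
    (l.set j v).getD j 0 = v := by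
  rw [List.getD_eq_getElem _ 0 (by simpa using h)]
  exact List.getElem_set_self (by simpa using h)

-- A's inner loop: repeated set-at-i accumulation equals one set of the summed products
lemma inner_loop (i : Int) (ks : List Int) (hks : ∀ k ∈ ks, 0 ≤ k ∧ k < i)
    (dp : List Int) (hlen : i.toNat < dp.length) :
    ks.foldl (fun d k =>
        d.set i.toNat (d.getD i.toNat 0 + d.getD k.toNat 0 * d.getD (i - 1 - k).toNat 0)) dp
      = dp.set i.toNat (dp.getD i.toNat 0 +
          (ks.map (fun k => dp.getD k.toNat 0 * dp.getD (i - 1 - k).toNat 0)).sum) := by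
  induction ks generalizing dp with
  | nil =>
    simp only [List.foldl_nil, List.map_nil, List.sum_nil, add_zero]
    rw [List.getD_eq_getElem dp 0 hlen]
    exact (List.set_getElem_self hlen).symm
  | cons k ks ih =>
    obtain ⟨hk0, hki⟩ := hks k List.mem_cons_self
    rw [List.foldl_cons,
      ih (fun k' hk' => hks k' (List.mem_cons_of_mem _ hk')) _ (by simpa using hlen)]
    rw [List.set_set, getD_set_self' _ _ _ hlen]
    congr 1
    have hmap : ∀ k' ∈ ks,
        ((dp.set i.toNat (dp.getD i.toNat 0 + dp.getD k.toNat 0 * dp.getD (i - 1 - k).toNat 0)).getD k'.toNat 0 *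
         (dp.set i.toNat (dp.getD i.toNat 0 + dp.getD k.toNat 0 * dp.getD (i - 1 - k).toNat 0)).getD (i - 1 - k').toNat 0)
        = dp.getD k'.toNat 0 * dp.getD (i - 1 - k').toNat 0 := by
      intro k' hk'
      obtain ⟨hk0', hki'⟩ := hks k' (List.mem_cons_of_mem _ hk')
      rw [getD_set_ne' _ _ _ _ (by omega), getD_set_ne' _ _ _ _ (by omega)]
    rw [List.map_congr_left hmap, List.map_cons, List.sum_cons]
    ring

-- the convolution of Catalan numbers is the next Catalan number (Int-cast form)
lemma sum_range_catalan (t : Nat) :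
    ((List.range (t + 1)).map (fun k => (catalan k : Int) * (catalan (t - k) : Int))).sum
      = (catalan (t + 1) : Int) := by
  have hnat : ((List.range (t + 1)).map (fun k => catalan k * catalan (t - k))).sum
      = catalan (t + 1) := by
    have h : ((List.range (t + 1)).map (fun k => catalan k * catalan (t - k))).sum
        = ∑ i ∈ Finset.range (t + 1), catalan i * catalan (t - i) := rfl
    rw [h, ← Fin.sum_univ_eq_sum_range, ← catalan_succ]
  calc ((List.range (t + 1)).map (fun k => (catalan k : Int) * (catalan (t - k) : Int))).sum
      = (((List.range (t + 1)).map (fun k => catalan k * catalan (t - k))).sum : Int) := by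
        rw [Nat.cast_list_sum, List.map_map]; rfl
    _ = (catalan (t + 1) : Int) := by rw [hnat]

lemma outer_loop (n t : Nat) (ht : t ≤ n) :
    dpInv n t ((PySem.List.pyRange 1 ((t : Int) + 1) 1).foldl dpStep
      ((List.replicate (n + 1) (0 : Int)).set 0 1)) := by
  induction t with
  | zero =>
    rw [show ((0 : Nat) : Int) + 1 = 1 by norm_num, PySem.List.pyRange_one_eq_nil (by omega),
      List.foldl_nil]
    refine ⟨by simp, fun j hj => ?_⟩
    rcases Nat.eq_zero_or_pos j with h0 | h0
    · subst h0
      rw [getD_set_self' _ _ _ (by simp)]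
      simp
    · rw [getD_set_ne' _ _ _ _ (by omega)]
      simp [List.getD, hj]
      omega
  | succ t ih =>
    have hInv := ih (by omega)
    set dp := (PySem.List.pyRange 1 ((t : Int) + 1) 1).foldl dpStep
      ((List.replicate (n + 1) (0 : Int)).set 0 1) with hdp
    obtain ⟨hlen, hval⟩ := hInv
    have hcast : (((t : Nat) + 1 : Nat) : Int) + 1 = (((t : Int) + 1) + 1) := by push_cast; ring
    rw [hcast, PySem.List.pyRange_one_succ_right (by omega), List.foldl_append, ← hdp,
      List.foldl_cons, List.foldl_nil]
    have htn : ((t : Int) + 1).toNat = t + 1 := by omega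
    have hlen' : ((t : Int) + 1).toNat < dp.length := by omega
    rw [show dpStep dp ((t : Int) + 1) = _ from inner_loop ((t : Int) + 1) _
      (fun k hk => by
        rw [PySem.List.mem_pyRange_one] at hk; exact ⟨hk.1, hk.2⟩) dp hlen']
    have hmap : ∀ k ∈ PySem.List.pyRange 0 ((t : Int) + 1) 1,
        dp.getD k.toNat 0 * dp.getD ((t : Int) + 1 - 1 - k).toNat 0
          = (catalan k.toNat : Int) * (catalan (t - k.toNat) : Int) := by
      intro k hk
      rw [PySem.List.mem_pyRange_one] at hk
      have h1 : (((t : Int) + 1 - 1 - k)).toNat = t - k.toNat := by omega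
      rw [h1, hval k.toNat (by omega), hval (t - k.toNat) (by omega),
        if_pos (by omega), if_pos (by omega)]
    rw [List.map_congr_left hmap, htn, hval (t + 1) (by omega), if_neg (by omega)]
    rw [show ((t : Int) + 1) = (((t + 1 : Nat)) : Int) by push_cast; ring,
      PySem.List.pyRange_zero_nat, List.map_map]
    have hcomp : ((List.range (t + 1)).map
        ((fun k : Int => (catalan k.toNat : Int) * (catalan (t - k.toNat) : Int)) ∘ (fun k : Nat => (k : Int))))
        = (List.range (t + 1)).map (fun k : Nat => (catalan k : Int) * (catalan (t - k) : Int)) := by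
      apply List.map_congr_left
      intro k hk
      simp
    rw [hcomp, sum_range_catalan, zero_add]
    refine ⟨by simpa using hlen, fun j hj => ?_⟩
    rcases eq_or_ne j (t + 1) with h0 | h0
    · subst h0
      rw [getD_set_self' _ _ _ (by omega)]
      simp
    · rw [getD_set_ne' _ _ _ _ h0, hval j hj]
      split_ifs with h1 h2 h2 <;> first | rfl | omega

lemma solve_eq (N : Nat) :
    solve (N : Int) = PySem.Int.mod (catalan N : Int) (10 ^ 9 + 7) := by
  unfold solve
  have ht1 : ((N : Int) + 1).toNat = N + 1 := by omega
  obtain ⟨hlen, hval⟩ := outer_loop N N le_rfl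
  simp only [ht1]
  show PySem.Int.mod (((PySem.List.pyRange 1 ((N : Int) + 1) 1).foldl dpStep
      ((List.replicate (N + 1) (0 : Int)).set 0 1)).getD (N : Int).toNat 0) (10 ^ 9 + 7) = _
  rw [show (N : Int).toNat = N by omega, hval N (by omega), if_pos le_rfl]

lemma solve_alt_eq (N : Nat) :
    solve_alt (N : Int) = PySem.Int.mod (catalan N : Int) (10 ^ 9 + 7) := by
  unfold solve_alt
  rw [alt_loop N]

-- ===== VERDICT (by name: the statement is the Claim_ definition above) =====
theorem solve_spec : Claim_equal_solve := by
  intro n _ hpre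
  unfold Spec_solve
  obtain ⟨N, rfl⟩ : ∃ N : Nat, n = (N : Int) := ⟨n.toNat, (Int.toNat_of_nonneg hpre).symm⟩
  rw [solve_eq N, solve_alt_eq N]
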